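-- pv_equiv track=rewrite | github.com/diegorramos84/coding-challenges | 02-json_parser/json_parser/main.py | contains_line_break_in_string
-- ===== SOURCE A (Python) =====
-- def contains_line_break_in_string(string):
--     in_string = False
--     escaped = False
--
--     for char in string:
--         if char == "\\" and not escaped:
--             escaped = True
--         elif char == '"' and not escaped:
--             in_string = not in_string
--         elif char == "n" and not escaped and in_string:
--             return True
--         else:
--             escaped = False
--
--     return False
-- ===== SOURCE B (Python) =====
-- def contains_line_break_in_string(string):
--     # pass 1: drop every backslash together with the character it escapes
--     cleaned = []
--     it = iter(string)
--     for c in it: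
--         if c == "\\":
--             next(it, None)
--         else:
--             cleaned.append(c)
--     # pass 2: split on quotes; odd-indexed segments are the string literals
--     parts = "".join(cleaned).split('"')
--     return any("n" in part for part in parts[1::2])
-- ===== Notes on version B (the rewrite author's own statement) =====
-- stated objective: alternative
-- what changed: Replaces A's one-pass escaped/in_string state-machine scan with staged passes: strip each backslash escape pair, split the result on double quotes, and test the odd-indexed (inside-string) segments for the character 'n'.
import Mathlib
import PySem

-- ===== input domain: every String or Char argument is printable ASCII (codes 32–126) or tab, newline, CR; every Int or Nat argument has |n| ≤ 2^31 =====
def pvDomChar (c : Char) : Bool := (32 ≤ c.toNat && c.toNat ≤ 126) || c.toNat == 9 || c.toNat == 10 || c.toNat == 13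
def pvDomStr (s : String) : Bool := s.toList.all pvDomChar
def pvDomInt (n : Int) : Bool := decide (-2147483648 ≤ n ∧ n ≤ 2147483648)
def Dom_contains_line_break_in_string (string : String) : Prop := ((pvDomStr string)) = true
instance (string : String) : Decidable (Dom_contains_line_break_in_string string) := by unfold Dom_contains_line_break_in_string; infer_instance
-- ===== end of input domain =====

-- B replaces A's single-pass escaped/in_string state machine by staged passes
-- (strip escape pairs, split on quotes, test odd-indexed segments for 'n'); equal return value, objective: alternative.

-- ===== PORT A =====
-- for char in string with state (in_string, escaped), early return True
def pvLoopA : List Char → Bool → Bool → Bool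
  | [], _, _ => false
  | c :: rest, ins, esc =>
    if c == '\\' && !esc then pvLoopA rest ins true
    else if c == '"' && !esc then pvLoopA rest (!ins) esc
    else if c == 'n' && !esc && ins then true
    else pvLoopA rest ins false

def contains_line_break_in_string (string : String) : Bool :=
  pvLoopA string.toList false false

-- ===== PORT B =====
-- pass 1: drop every backslash together with the character it escapes
def pvClean : List Char → List Char
  | [] => []
  | c :: rest => if c == '\\' then pvClean (rest.drop 1) else c :: pvClean rest
termination_by l => l.length
decreasing_by all_goals simp

-- pass 2: split on '"' (Python str.split: always at least one segment)
def pvSplitQ : List Char → List (List Char)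
  | [] => [[]]
  | c :: rest =>
    if c == '"' then [] :: pvSplitQ rest
    else
      match pvSplitQ rest with
      | p :: ps => (c :: p) :: ps
      | [] => [[c]]

-- parts[1::2]
def pvOdd : List (List Char) → List (List Char)
  | [] => []
  | [_] => []
  | _ :: p :: ps => p :: pvOdd ps

def contains_line_break_in_string_alt (string : String) : Bool :=
  (pvOdd (pvSplitQ (pvClean string.toList))).any (fun p => p.contains 'n')

-- ===== PRECONDITION & SPEC =====
def Spec_contains_line_break_in_string (string : String) (out : Bool) : Prop := out = contains_line_break_in_string_alt string
instance (string : String) (out : Bool) : Decidable (Spec_contains_line_break_in_string string out) := by unfold Spec_contains_line_break_in_string; infer_instance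

-- ===== CLAIM (what is proved, stated in full; the proofs are below) =====
def Claim_equal_contains_line_break_in_string : Prop := ∀ (string : String), Dom_contains_line_break_in_string string → Spec_contains_line_break_in_string string (contains_line_break_in_string string)

-- ===== LEMMAS AND PROOFS =====

-- quote/'n' scan with no escape state (intermediate characterisation of A on cleaned input)
def pvScan : List Char → Bool → Bool
  | [], _ => false
  | c :: rest, ins =>
    if c == '"' then pvScan rest (!ins)
    else if c == 'n' && ins then true
    else pvScan rest ins

-- alternating membership test over split segments
def pvAnyAt : Bool → List (List Char) → Bool
  | _, [] => false
  | b, p :: ps => (b && p.contains 'n') || pvAnyAt (!b) ps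

theorem pvLoopA_clean : ∀ (l : List Char) (ins : Bool), pvLoopA l ins false = pvScan (pvClean l) ins
  | [], _ => by simp [pvLoopA, pvClean, pvScan]
  | c :: rest, ins => by
    by_cases hb : c = '\\'
    · subst hb
      cases rest with
      | nil => simp [pvLoopA, pvClean, pvScan]
      | cons d r =>
        simp only [pvLoopA, pvClean]
        norm_num
        exact pvLoopA_clean r ins
    · by_cases hq : c = '"'
      · subst hq
        simp [pvLoopA, pvClean, pvScan, pvLoopA_clean rest (!ins)]
      · by_cases hn : c = 'n' ∧ ins = true
        · obtain ⟨h1, h2⟩ := hn; subst h1 h2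
          simp [pvLoopA, pvClean, pvScan]
        · by_cases hc : c = 'n'
          · have hi : ins = false := by
              cases ins with
              | false => rfl
              | true => exact absurd ⟨hc, rfl⟩ hn
            subst hc hi
            simp [pvLoopA, pvClean, pvScan, pvLoopA_clean rest false]
          · simp [pvLoopA, pvClean, pvScan, hb, hq, hc, pvLoopA_clean rest ins]
termination_by l => l.length
decreasing_by all_goals simp

theorem pvSplitQ_ne_nil (l : List Char) : pvSplitQ l ≠ [] := by
  cases l with
  | nil => simp [pvSplitQ]
  | cons c rest =>
    simp only [pvSplitQ]
    split
    · simp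
    · cases h : pvSplitQ rest <;> simp

theorem pvScan_anyAt : ∀ (l : List Char) (ins : Bool), pvScan l ins = pvAnyAt ins (pvSplitQ l) := by
  intro l
  induction l with
  | nil => intro ins; simp [pvScan, pvSplitQ, pvAnyAt]
  | cons c rest ih =>
    intro ins
    by_cases hq : c = '"'
    · subst hq
      simp [pvScan, pvSplitQ, pvAnyAt, ih (!ins)]
    · obtain ⟨p, ps, h⟩ : ∃ p ps, pvSplitQ rest = p :: ps := by
        cases h : pvSplitQ rest with
        | nil => exact absurd h (pvSplitQ_ne_nil rest)
        | cons p ps => exact ⟨p, ps, rfl⟩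
      have hsp : pvSplitQ (c :: rest) = (c :: p) :: ps := by
        simp [pvSplitQ, hq, h]
      rw [hsp]
      by_cases hn : c = 'n'
      · subst hn
        cases ins with
        | true => simp [pvScan, pvAnyAt]
        | false => simp [pvScan, pvAnyAt, ih false, h]
      · simp [pvScan, pvAnyAt, hq, hn, Ne.symm hn, ih ins, h]

theorem pvAnyAt_false : ∀ (ps : List (List Char)), pvAnyAt false ps = (pvOdd ps).any (fun p => p.contains 'n')
  | [] => by simp [pvAnyAt, pvOdd]
  | [p] => by simp [pvAnyAt, pvOdd]
  | p :: q :: ps => by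
    simp [pvAnyAt, pvOdd, pvAnyAt_false ps]

-- ===== VERDICT (by name: the statement is the Claim_ definition above) =====
theorem contains_line_break_in_string_spec : Claim_equal_contains_line_break_in_string := by
  intro s _
  unfold Spec_contains_line_break_in_string contains_line_break_in_string contains_line_break_in_string_alt
  rw [pvLoopA_clean, pvScan_anyAt, pvAnyAt_false]
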